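-- pv_equiv track=rewrite | github.com/hwennnn/leetcode-solutions | problems/append_k_integers_with_minimal_sum/solution.py | minimalKSum
-- ===== SOURCE A (Python) =====
-- from typing import List
--
-- def minimalKSum(nums: List[int], k: int) -> int:
--     nums = sorted(list(set(nums)))
--     n = len(nums)
--
--     if nums[-1] <= k + n:
--         return (k + n) * (k + n + 1) // 2 - sum(nums)
--
--     left, right = 0, n - 1
--
--     while left < right:
--         mid = left + (right - left) // 2
--
--         if nums[mid] - mid > k:
--             right = mid
--         else:
--             left = mid + 1
--
--     return (left + k) * (left + k + 1) // 2 - sum(nums[:left])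
-- ===== SOURCE B (Python) =====
-- def minimalKSum(nums, k):
--     n = 0       # number of distinct values seen
--     total = 0   # their sum
--     c = 0       # how many distinct values v (at distinct-index i) have v - i <= k
--     prefix = 0  # sum of those values
--     last = None
--     for v in sorted(nums):
--         if v != last:
--             last = v
--             if v - n <= k:
--                 c += 1
--                 prefix += v
--             n += 1
--             total += v
--     if last <= k + n:
--         return (k + n) * (k + n + 1) // 2 - total
--     return (c + k) * (c + k + 1) // 2 - prefix
-- ===== Notes on version B (the rewrite author's own statement) =====
-- stated objective: alternative
-- what changed: B replaces A's sorted(set(...)) list plus binary search plus sum-of-slice by ONE fold over sorted(nums) that skips adjacent duplicates and simultaneously accumulates the distinct count, total, the boundary count c = |{i : s[i]-i <= k}| and its prefix sum, then applies A's two closed-form formulas.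
import Mathlib
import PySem

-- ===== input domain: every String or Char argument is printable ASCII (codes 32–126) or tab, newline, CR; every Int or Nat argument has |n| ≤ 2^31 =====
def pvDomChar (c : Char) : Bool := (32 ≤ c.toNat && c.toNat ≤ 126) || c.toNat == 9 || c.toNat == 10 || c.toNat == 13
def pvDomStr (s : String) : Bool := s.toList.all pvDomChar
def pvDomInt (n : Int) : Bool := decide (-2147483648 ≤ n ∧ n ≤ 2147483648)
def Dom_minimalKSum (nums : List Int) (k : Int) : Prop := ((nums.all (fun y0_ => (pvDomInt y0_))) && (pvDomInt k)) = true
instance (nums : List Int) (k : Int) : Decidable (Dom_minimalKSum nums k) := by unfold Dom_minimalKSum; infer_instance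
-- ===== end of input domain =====

-- B replaces A's sorted(set(...)) + binary search + slice sum by a single fold over
-- sorted(nums) that skips adjacent duplicates and accumulates everything in one pass.

-- ===== PORT A =====
-- the while-loop 'while left < right: mid = …' of A; indices mid are always in
-- range when the loop is reached, so pyGetD with default 0 is exact here.
def bsA (l : List Int) (k : Int) (left right : Int) : Int :=
  if h : left < right then
    let mid := left + PySem.Int.floordiv (right - left) 2
    if PySem.List.pyGetD l mid 0 - mid > k then bsA l k left mid
    else bsA l k (mid + 1) right
  else left
termination_by (right - left).toNat
decreasing_by
  all_goals
    have hfd : PySem.Int.floordiv (right - left) 2 = (right - left) / 2 :=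
      PySem.Int.floordiv_eq_ediv_of_pos (by omega)
    omega

def minimalKSum (nums : List Int) (k : Int) : Int :=
  let s := PySem.List.sorted (PySem.Set.ofList nums) (fun x => x) false
  let n : Int := s.length
  match PySem.List.pyGet? s (-1) with
  | none => 0  -- unreachable under Pre_ (nums ≠ []): Python raises IndexError here
  | some last =>
    if last ≤ k + n then
      PySem.Int.floordiv ((k + n) * (k + n + 1)) 2 - s.sum
    else
      let left := bsA s k 0 (n - 1)
      PySem.Int.floordiv ((left + k) * (left + k + 1)) 2
        - (PySem.List.slice s none (some left)).sum

-- ===== PORT B =====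
-- the loop body 'if v != last: last = v; if v - n <= k: c += 1; prefix += v; n += 1; total += v'
-- state = (n, total, c, prefix, last)
def stepB (k : Int) (st : Int × Int × Int × Int × Option Int) (v : Int) :
    Int × Int × Int × Int × Option Int :=
  match st with
  | (n, total, c, pre, last) =>
    if some v ≠ last then
      if v - n ≤ k then (n + 1, total + v, c + 1, pre + v, some v)
      else (n + 1, total + v, c, pre, some v)
    else st

def minimalKSum_alt (nums : List Int) (k : Int) : Int :=
  let st := (PySem.List.sorted nums (fun x => x) false).foldl (stepB k)
    ((0 : Int), (0 : Int), (0 : Int), (0 : Int), (none : Option Int))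
  match st.2.2.2.2 with
  | none => 0  -- unreachable under Pre_ (nums ≠ []): Python raises TypeError (None <= int) here
  | some last =>
    if last ≤ k + st.1 then
      PySem.Int.floordiv ((k + st.1) * (k + st.1 + 1)) 2 - st.2.1
    else
      PySem.Int.floordiv ((st.2.2.1 + k) * (st.2.2.1 + k + 1)) 2 - st.2.2.2.1

-- ===== PRECONDITION & SPEC =====
-- Pre_ excludes the empty list, on which the Python A raises IndexError (and B TypeError).
def Pre_minimalKSum (nums : List Int) (k : Int) : Prop := nums ≠ []
instance (nums : List Int) (k : Int) : Decidable (Pre_minimalKSum nums k) := by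
  unfold Pre_minimalKSum; infer_instance
def pvWitness_minimalKSum : List Int × Int := ([1, 4, 25, 10, 25], 2)

def Spec_minimalKSum (nums : List Int) (k : Int) (out : Int) : Prop := out = minimalKSum_alt nums k
instance (nums : List Int) (k : Int) (out : Int) : Decidable (Spec_minimalKSum nums k out) := by unfold Spec_minimalKSum; infer_instance

-- ===== CLAIM (what is proved, stated in full; the proofs are below) =====
def Claim_equal_minimalKSum : Prop := ∀ (nums : List Int) (k : Int), Dom_minimalKSum nums k → Pre_minimalKSum nums k → Spec_minimalKSum nums k (minimalKSum nums k)

-- ===== LEMMAS AND PROOFS =====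

-- value inspected by A's binary search at index i
def fval (l : List Int) (i : Int) : Int := PySem.List.pyGetD l i 0 - i

-- on a strictly increasing list, i ↦ l[i] - i is monotone
theorem fval_mono_nat (l : List Int) (hp : l.Pairwise (· < ·)) :
    ∀ (a b : Nat) (ha : a < l.length) (hb : b < l.length), a ≤ b →
      l[a] - (a : Int) ≤ l[b] - (b : Int) := by
  intro a b
  induction b with
  | zero => intro ha hb hab; interval_cases a; simp
  | succ b ih =>
    intro ha hb1 hab
    rcases Nat.lt_or_ge a (b + 1) with h | h
    · have hadj : l[b]'(by omega) < l[b + 1] :=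
        (List.pairwise_iff_getElem.mp hp) b (b + 1) (by omega) hb1 (by omega)
      have := ih ha (by omega) (by omega)
      push_cast
      omega
    · have : a = b + 1 := by omega
      subst this; simp

theorem fval_mono (l : List Int) (hp : l.Pairwise (· < ·)) :
    ∀ (i j : Int), 0 ≤ i → i ≤ j → j < (l.length : Int) → fval l i ≤ fval l j := by
  intro i j h0 hij hj
  have hjl : j.toNat < l.length := by omega
  have hil : i.toNat < l.length := by omega
  rw [fval, fval, PySem.List.pyGetD_eq_getElem l 0 h0 (by omega),
    PySem.List.pyGetD_eq_getElem l 0 (by omega : (0:Int) ≤ j) (by omega)]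
  have := fval_mono_nat l hp i.toNat j.toNat hil hjl (by omega)
  omega

-- characterization of A's binary-search result index
def IsBoundary (l : List Int) (k : Int) (L : Int) : Prop :=
  0 ≤ L ∧ L ≤ (l.length : Int) - 1 ∧
  (∀ i : Int, 0 ≤ i → i < L → fval l i ≤ k) ∧
  (L < (l.length : Int) - 1 → fval l L > k)

theorem bsA_spec_aux (l : List Int) (k : Int) (hp : l.Pairwise (· < ·)) :
    ∀ (m : Nat) (left right : Int), (right - left).toNat ≤ m →
    0 ≤ left → left ≤ right → right ≤ (l.length : Int) - 1 →
    (∀ i : Int, 0 ≤ i → i < left → fval l i ≤ k) →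
    (right < (l.length : Int) - 1 → fval l right > k) →
    IsBoundary l k (bsA l k left right) := by
  intro m
  induction m with
  | zero =>
    intro left right hm h0 hlr hrn hinv hr
    rw [bsA]
    have hne : ¬ left < right := by omega
    simp only [hne, dif_neg, not_false_iff]
    have hle : left = right := by omega
    exact ⟨h0, by omega, hinv, by rw [hle]; exact hr⟩
  | succ m ih =>
    intro left right hm h0 hlr hrn hinv hr
    rw [bsA]
    by_cases hlt : left < right
    · simp only [hlt, dif_pos]
      have hfd : PySem.Int.floordiv (right - left) 2 = (right - left) / 2 :=
        PySem.Int.floordiv_eq_ediv_of_pos (by omega)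
      set mid := left + PySem.Int.floordiv (right - left) 2 with hmid
      have hmb : left ≤ mid ∧ mid < right := by omega
      by_cases hc : PySem.List.pyGetD l mid 0 - mid > k
      · simp only [hc, if_pos]
        exact ih left mid (by omega) h0 (by omega) (by omega) hinv
          (fun _ => hc)
      · simp only [hc, if_neg, not_false_iff]
        have hmk : fval l mid ≤ k := by simpa [fval] using hc
        refine ih (mid + 1) right (by omega) (by omega) (by omega) hrn ?_ hr
        intro i hi0 hi
        exact le_trans (fval_mono l hp i mid hi0 (by omega) (by omega)) hmk
    · simp only [hlt, dif_neg, not_false_iff]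
      have hle : left = right := by omega
      exact ⟨h0, by omega, hinv, by rw [hle]; exact hr⟩

theorem bsA_spec (l : List Int) (k : Int) (hp : l.Pairwise (· < ·))
    (left right : Int) (h0 : 0 ≤ left) (hlr : left ≤ right)
    (hrn : right ≤ (l.length : Int) - 1)
    (hinv : ∀ i : Int, 0 ≤ i → i < left → fval l i ≤ k)
    (hr : right < (l.length : Int) - 1 → fval l right > k) :
    IsBoundary l k (bsA l k left right) :=
  bsA_spec_aux l k hp (right - left).toNat left right le_rfl h0 hlr hrn hinv hr

theorem boundary_unique (l : List Int) (k : Int) (L M : Int)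
    (hL : IsBoundary l k L) (hM : IsBoundary l k M) : L = M := by
  rcases hL with ⟨h1, h2, h3, h4⟩
  rcases hM with ⟨g1, g2, g3, g4⟩
  by_contra hne
  rcases lt_or_gt_of_ne hne with h | h
  · have := g3 L h1 h; have := h4 (by omega); omega
  · have := h3 M g1 h; have := g4 (by omega); omega

-- ---- B-side proof machinery: adjacent dedup, count and prefix sum specs ----

-- the sublist of t that B's fold actually processes, given the running 'last'
def ddup (last : Option Int) : List Int → List Int
  | [] => []
  | v :: t => if some v = last then ddup last t else v :: ddup (some v) t

-- c and prefix computed by a pure recursion, starting at distinct-index n0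
def cntB (k : Int) : Int → List Int → Int
  | _, [] => 0
  | n0, v :: t => (if v - n0 ≤ k then 1 else 0) + cntB k (n0 + 1) t

def psumB (k : Int) : Int → List Int → Int
  | _, [] => 0
  | n0, v :: t => (if v - n0 ≤ k then v else 0) + psumB k (n0 + 1) t

-- B's fold over t = fold over ddup st.last t (the skip branch removed)
theorem fold_eq_fold_ddup (k : Int) :
    ∀ (t : List Int) (st : Int × Int × Int × Int × Option Int),
      t.foldl (stepB k) st = (ddup st.2.2.2.2 t).foldl (stepB k) st := by
  intro t
  induction t with
  | nil => intro st; simp [ddup]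
  | cons v t ih =>
    intro st
    obtain ⟨n, total, c, pre, last⟩ := st
    by_cases hv : some v = last
    · have hstep : stepB k (n, total, c, pre, last) v = (n, total, c, pre, last) := by
        simp [stepB, hv]
      simp only [List.foldl_cons, hstep, ddup, if_pos hv]
      exact ih (n, total, c, pre, last)
    · simp only [List.foldl_cons, ddup, if_neg hv]
      by_cases hk : v - n ≤ k
      · have hstep : stepB k (n, total, c, pre, last) v
            = (n + 1, total + v, c + 1, pre + v, some v) := by
          simp [stepB, hv, hk]
        rw [hstep]
        exact ih (n + 1, total + v, c + 1, pre + v, some v)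
      · have hstep : stepB k (n, total, c, pre, last) v
            = (n + 1, total + v, c, pre, some v) := by
          simp [stepB, hv, hk]
        rw [hstep]
        exact ih (n + 1, total + v, c, pre, some v)

theorem getLast?_cons_or (v : Int) (t : List Int) :
    (v :: t).getLast? = t.getLast?.or (some v) := by
  cases t with
  | nil => simp
  | cons w t =>
    rw [List.getLast?_cons_cons]
    cases h : (w :: t).getLast? with
    | none => exact absurd (List.getLast?_eq_none_iff.mp h) (by simp)
    | some a => simp

-- on a strictly increasing list whose elements all exceed l0's value, the skip never fires
theorem fold_pure (k : Int) :
    ∀ (d : List Int) (n0 t0 c0 p0 : Int) (l0 : Option Int),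
      d.Pairwise (· < ·) → (∀ a, l0 = some a → ∀ x ∈ d, a < x) →
      d.foldl (stepB k) (n0, t0, c0, p0, l0)
        = (n0 + (d.length : Int), t0 + d.sum, c0 + cntB k n0 d, p0 + psumB k n0 d,
           d.getLast?.or l0) := by
  intro d
  induction d with
  | nil => intro n0 t0 c0 p0 l0 _ _; simp [cntB, psumB]
  | cons v t ih =>
    intro n0 t0 c0 p0 l0 hp hl
    have hvl : some v ≠ l0 := by
      intro h
      have := hl v h.symm v List.mem_cons_self
      omega
    have htp : t.Pairwise (· < ·) := hp.of_cons
    have htl : ∀ a, (some v : Option Int) = some a → ∀ x ∈ t, a < x := by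
      intro a ha x hx
      have : v = a := by injection ha
      subst this
      exact (List.pairwise_cons.mp hp).1 x hx
    by_cases hk : v - n0 ≤ k
    · have hstep : stepB k (n0, t0, c0, p0, l0) v
          = (n0 + 1, t0 + v, c0 + 1, p0 + v, some v) := by
        simp [stepB, hvl, hk]
      rw [List.foldl_cons, hstep, ih (n0+1) (t0+v) (c0+1) (p0+v) (some v) htp htl,
        getLast?_cons_or, Option.or_assoc, Option.some_or]
      simp only [Prod.mk.injEq, List.length_cons, List.sum_cons, cntB, psumB, if_pos hk]
      refine ⟨by push_cast; ring, by ring, by ring, by ring, trivial⟩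
    · have hstep : stepB k (n0, t0, c0, p0, l0) v
          = (n0 + 1, t0 + v, c0, p0, some v) := by
        simp [stepB, hvl, hk]
      rw [List.foldl_cons, hstep, ih (n0+1) (t0+v) c0 p0 (some v) htp htl,
        getLast?_cons_or, Option.or_assoc, Option.some_or]
      simp only [Prod.mk.injEq, List.length_cons, List.sum_cons, cntB, psumB, if_neg hk]
      refine ⟨by push_cast; ring, by ring, by ring, by ring, trivial⟩

-- ddup of a ≤-sorted list is strictly increasing with the expected membership
theorem ddup_spec :
    ∀ (t : List Int) (last : Option Int), t.Pairwise (· ≤ ·) →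
      (∀ a, last = some a → ∀ x ∈ t, a ≤ x) →
      (ddup last t).Pairwise (· < ·) ∧
      (∀ x, x ∈ ddup last t ↔ x ∈ t ∧ some x ≠ last) := by
  intro t
  induction t with
  | nil => intro last _ _; simp [ddup]
  | cons v t ih =>
    intro last hp hl
    have htp : t.Pairwise (· ≤ ·) := hp.of_cons
    by_cases hv : some v = last
    · rw [ddup, if_pos hv]
      obtain ⟨hpw, hmem⟩ := ih last htp (fun a ha x hx => hl a ha x (List.mem_cons_of_mem v hx))
      refine ⟨hpw, fun x => ?_⟩
      rw [hmem x]
      constructor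
      · rintro ⟨hx, hne⟩; exact ⟨List.mem_cons_of_mem v hx, hne⟩
      · rintro ⟨hx, hne⟩
        rcases List.mem_cons.mp hx with h | h
        · exact absurd (h ▸ hv) hne
        · exact ⟨h, hne⟩
    · rw [ddup, if_neg hv]
      have hvt : ∀ a, (some v : Option Int) = some a → ∀ x ∈ t, a ≤ x := by
        intro a ha x hx
        have : v = a := by injection ha
        subst this
        exact (List.pairwise_cons.mp hp).1 x hx
      obtain ⟨hpw, hmem⟩ := ih (some v) htp hvt
      constructor
      · refine List.pairwise_cons.mpr ⟨?_, hpw⟩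
        intro y hy
        obtain ⟨hyt, hyne⟩ := (hmem y).mp hy
        have hvy : v ≤ y := (List.pairwise_cons.mp hp).1 y hyt
        have : y ≠ v := by intro h; exact hyne (by rw [h])
        omega
      · intro x
        simp only [List.mem_cons, hmem x]
        constructor
        · rintro (h | ⟨hx, hne⟩)
          · subst h; exact ⟨Or.inl rfl, hv⟩
          · refine ⟨Or.inr hx, ?_⟩
            cases hlast : last with
            | none => simp
            | some a =>
              have hav : a ≤ v := hl a hlast v List.mem_cons_self
              have hax : a ≤ x := hl a hlast x (List.mem_cons_of_mem v hx)
              have hvx : v ≤ x := hvt v rfl x hx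
              have hva : v ≠ a := by intro h; exact hv (by rw [hlast, h])
              intro h
              have : x = a := by injection h
              omega
        · rintro ⟨h | h, hne⟩
          · exact Or.inl h
          · by_cases hxv : x = v
            · exact Or.inl hxv
            · exact Or.inr ⟨h, by intro hc; exact hxv (by injection hc)⟩

-- cntB/psumB characterize the boundary count and its prefix sum
theorem cntB_zero (k : Int) :
    ∀ (d : List Int) (n0 b : Int), d.Pairwise (· < ·) → (∀ x ∈ d, b ≤ x) →
      b - n0 > k → cntB k n0 d = 0 ∧ psumB k n0 d = 0 := by
  intro d
  induction d with
  | nil => intro n0 b _ _ _; simp [cntB, psumB]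
  | cons v t ih =>
    intro n0 b hp hb hk
    have hv : b ≤ v := hb v List.mem_cons_self
    have hvk : ¬ v - n0 ≤ k := by omega
    have ht : ∀ x ∈ t, b + 1 ≤ x := by
      intro x hx
      have := (List.pairwise_cons.mp hp).1 x hx
      omega
    obtain ⟨h1, h2⟩ := ih (n0 + 1) (b + 1) hp.of_cons ht (by omega)
    simp only [cntB, psumB, if_neg hvk, h1, h2]
    omega

theorem cntB_spec (k : Int) :
    ∀ (d : List Int) (n0 : Int), d.Pairwise (· < ·) →
      0 ≤ cntB k n0 d ∧ cntB k n0 d ≤ (d.length : Int) ∧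
      (∀ (j : Nat) (hj : j < d.length), (j : Int) < cntB k n0 d → d[j] - (n0 + j) ≤ k) ∧
      (∀ (j : Nat) (hj : j < d.length), (j : Int) = cntB k n0 d → d[j] - (n0 + j) > k) ∧
      psumB k n0 d = (d.take (cntB k n0 d).toNat).sum := by
  intro d
  induction d with
  | nil =>
    intro n0 _
    refine ⟨by simp [cntB], by simp [cntB], ?_, ?_, by simp [cntB, psumB]⟩ <;>
      intro j hj <;> exact absurd hj (by simp)
  | cons v t ih =>
    intro n0 hp
    by_cases hk : v - n0 ≤ k
    · obtain ⟨i1, i2, i3, i4, i5⟩ := ih (n0 + 1) hp.of_cons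
      have hc : cntB k n0 (v :: t) = 1 + cntB k (n0 + 1) t := by
        simp only [cntB, if_pos hk]
      have hps : psumB k n0 (v :: t) = v + psumB k (n0 + 1) t := by
        simp only [psumB, if_pos hk]
      refine ⟨by omega, by rw [hc]; simp only [List.length_cons]; push_cast; omega, ?_, ?_, ?_⟩
      · intro j hj hjc
        cases j with
        | zero => simp only [List.getElem_cons_zero]; push_cast; omega
        | succ j =>
          have := i3 j (by simpa using hj) (by omega)
          simp only [List.getElem_cons_succ]
          push_cast
          push_cast at this
          omega
      · intro j hj hjc
        cases j with
        | zero => rw [hc] at hjc; omega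
        | succ j =>
          have := i4 j (by simpa using hj) (by rw [hc] at hjc; push_cast at hjc ⊢; omega)
          simp only [List.getElem_cons_succ]
          push_cast
          push_cast at this
          omega
      · rw [hps, i5, hc]
        have : (1 + cntB k (n0+1) t).toNat = (cntB k (n0+1) t).toNat + 1 := by omega
        rw [this, List.take_succ_cons, List.sum_cons]
    · have ht0 : cntB k (n0 + 1) t = 0 ∧ psumB k (n0 + 1) t = 0 := by
        refine cntB_zero k t (n0 + 1) (v + 1) hp.of_cons ?_ (by omega)
        intro x hx
        have := (List.pairwise_cons.mp hp).1 x hx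
        omega
      have hc : cntB k n0 (v :: t) = 0 := by
        simp only [cntB, if_neg hk, ht0.1]
        omega
      have hps : psumB k n0 (v :: t) = 0 := by
        simp only [psumB, if_neg hk, ht0.2]
        omega
      refine ⟨by omega, by rw [hc]; push_cast; omega, ?_, ?_, by simp [hps, hc]⟩
      · intro j hj hjc; rw [hc] at hjc; omega
      · intro j hj hjc
        have hj0 : j = 0 := by rw [hc] at hjc; omega
        subst hj0
        simp only [List.getElem_cons_zero]
        push_cast
        omega

theorem slice_to_sum (l : List Int) (L : Int) (hL : 0 ≤ L) :
    (PySem.List.slice l none (some L)).sum = (l.take L.toNat).sum := by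
  rw [PySem.List.slice_to _ hL]

-- ddup none (sorted nums) is exactly A's sorted(set(nums))
theorem ddup_eq_sorted_set (nums : List Int) :
    ddup none (PySem.List.sorted nums (fun x => x) false)
      = PySem.List.sorted (PySem.Set.ofList nums) (fun x => x) false := by
  set t := PySem.List.sorted nums (fun x => x) false with ht
  have htp : t.Pairwise (· ≤ ·) := by
    have := PySem.List.sorted_pairwise nums (fun x => x)
    simpa [ht] using this
  obtain ⟨hpw, hmem⟩ := ddup_spec t none htp (by intro a ha; cases ha)
  have hmem' : ∀ x, x ∈ ddup none t ↔ x ∈ nums := by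
    intro x
    rw [hmem x]
    simp [ht, PySem.List.mem_sorted]
  have hnd : (ddup none t).Nodup := hpw.nodup
  have hsnd : (PySem.Set.ofList nums).Nodup := PySem.Set.nodup_ofList nums
  have hperm : (ddup none t).Perm (PySem.Set.ofList nums) := by
    rw [List.perm_ext_iff_of_nodup hnd hsnd]
    intro x
    rw [hmem' x, PySem.Set.mem_ofList]
  symm
  exact PySem.List.sorted_eq_of_perm_of_pairwise_lt (PySem.Set.ofList nums)
    (ddup none t) (fun x => x) hperm (by simpa using hpw)

-- ===== VERDICT (by name: the statement is the Claim_ definition above) =====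
theorem minimalKSum_spec : Claim_equal_minimalKSum := by
  intro nums k _ hpre
  unfold Spec_minimalKSum
  simp only [minimalKSum, minimalKSum_alt]
  have hofl : PySem.Set.ofList nums ≠ [] := by
    cases nums with
    | nil => exact absurd rfl hpre
    | cons a t =>
      intro h
      have ha : a ∈ PySem.Set.ofList (a :: t) :=
        (PySem.Set.mem_ofList _ a).mpr List.mem_cons_self
      rw [h] at ha
      exact absurd ha List.not_mem_nil
  set s := PySem.List.sorted (PySem.Set.ofList nums) (fun x => x) false with hs
  have hsne : s ≠ [] := by
    rw [hs, Ne, PySem.List.sorted_eq_nil_iff]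
    exact hofl
  have hlen : 0 < s.length := List.length_pos_of_ne_nil hsne
  have hp : s.Pairwise (· < ·) := by
    rw [hs]; exact PySem.List.sorted_ofList_pairwise_lt nums
  -- evaluate B's fold
  have hfold : (PySem.List.sorted nums (fun x => x) false).foldl (stepB k)
      ((0:Int), (0:Int), (0:Int), (0:Int), (none : Option Int))
      = ((s.length : Int), s.sum, cntB k 0 s, psumB k 0 s, s.getLast?) := by
    rw [fold_eq_fold_ddup]
    show (ddup none _).foldl _ _ = _
    rw [ddup_eq_sorted_set nums, ← hs,
      fold_pure k s 0 0 0 0 none hp (by intro a ha; cases ha)]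
    simp
  rw [hfold]
  have hlast : PySem.List.pyGet? s (-1) = s.getLast? := by
    rw [PySem.List.pyGet?_neg_one]
  rw [hlast]
  cases hgl : s.getLast? with
  | none => exact absurd (List.getLast?_eq_none_iff.mp hgl) hsne
  | some last =>
    simp only []
    by_cases hbr : last ≤ k + (s.length : Int)
    · rw [if_pos hbr, if_pos hbr]
    · rw [if_neg hbr, if_neg hbr]
      -- the last element fails the boundary test
      have hge : s.getLast hsne = last := by
        rw [List.getLast?_eq_some_getLast hsne] at hgl
        injection hgl
      have hlast_idx : s[s.length - 1]'(by omega) = last := by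
        rw [← hge, List.getLast_eq_getElem]
      obtain ⟨c0, c1, c2, c3, c4⟩ := cntB_spec k s 0 hp
      set c := cntB k 0 s with hc
      have hfail : (s.length : Int) - 1 < c → False := by
        intro h
        have := c2 (s.length - 1) (by omega) (by push_cast; omega)
        rw [hlast_idx] at this
        push_cast at this
        omega
      have hcle : c ≤ (s.length : Int) - 1 := by
        by_contra h
        exact hfail (by omega)
      -- c is a boundary index
      have hbdry : IsBoundary s k c := by
        refine ⟨c0, hcle, ?_, ?_⟩
        · intro i hi0 hic
          have hil : i.toNat < s.length := by omega
          have := c2 i.toNat hil (by omega)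
          rw [fval, PySem.List.pyGetD_eq_getElem s 0 hi0 (by omega)]
          omega
        · intro hlt
          have hcl : c.toNat < s.length := by omega
          have := c3 c.toNat hcl (by omega)
          rw [fval, PySem.List.pyGetD_eq_getElem s 0 c0 (by omega)]
          omega
      have hA := bsA_spec s k hp 0 ((s.length : Int) - 1) le_rfl (by omega) le_rfl
        (fun i hi0 hi => absurd hi (by omega)) (fun h => absurd h (by omega))
      have hEq : bsA s k 0 ((s.length : Int) - 1) = c := boundary_unique s k _ _ hA hbdry
      rw [hEq, c4, slice_to_sum s c c0]
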